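-- pv_equiv track=rewrite | github.com/mayowaibi/leetcode-practice | 1927-maximum-ascending-subarray-sum/maximum-ascending-subarray-sum.py | maxAscendingSum2
-- ===== SOURCE A (Python) =====
-- from typing import List
--
-- def maxAscendingSum2(nums: List[int]) -> int:
--     res = nums[0]
--
--     for i in range(len(nums)):
--         curr = nums[i]
--         for j in range(i+1, len(nums)):
--             if nums[j] > nums[j-1]:
--                 curr += nums[j]
--                 res = max(res, curr)
--             else:
--                 break
--
--     return res
-- ===== SOURCE B (Python) =====
-- from typing import List
--
-- def maxAscendingSum2(nums: List[int]) -> int: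
--     # Right-to-left single pass: p = best ascending-run sum STARTING just to
--     # the right of the current position; record x + p whenever x starts an
--     # ascending pair. O(n) instead of A's O(n^2) nested restarts.
--     it = reversed(nums)
--     nxt = next(it)          # element to the right of the one being visited
--     p = nxt                 # best ascending sum starting at position of nxt
--     res = None              # best sum of an ascending subarray of length >= 2
--     for x in it:
--         if nxt > x:
--             cand = x + p
--             res = cand if res is None else max(res, cand)
--             p = x + max(p, 0)
--         else:
--             p = x
--         nxt = x
--     return nums[0] if res is None else max(nums[0], res)
-- ===== Notes on version B (the rewrite author's own statement) =====
-- stated objective: faster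
-- what changed: Replaced A's nested loops (a fresh ascending scan restarted at every index) with a single right-to-left pass that maintains the best ascending-run sum starting just right of the current position and records a candidate whenever an ascending pair begins.
import Mathlib
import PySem

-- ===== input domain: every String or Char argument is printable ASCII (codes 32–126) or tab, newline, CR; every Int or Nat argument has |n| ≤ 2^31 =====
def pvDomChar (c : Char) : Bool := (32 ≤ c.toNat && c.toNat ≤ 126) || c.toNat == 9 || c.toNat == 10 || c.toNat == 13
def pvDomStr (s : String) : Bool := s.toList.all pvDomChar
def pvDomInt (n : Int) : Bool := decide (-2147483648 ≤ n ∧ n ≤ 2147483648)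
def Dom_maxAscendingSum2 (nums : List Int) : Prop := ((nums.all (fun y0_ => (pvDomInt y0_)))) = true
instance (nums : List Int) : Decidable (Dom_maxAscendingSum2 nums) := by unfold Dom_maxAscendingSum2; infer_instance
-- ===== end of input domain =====

-- B replaces A's quadratic nested restarts by one linear right-to-left pass; return values proved equal on nonempty lists (A raises IndexError on []).

-- ===== PORT A =====
-- inner j-loop of A: curr accumulates while strictly ascending, res records each extension; break otherwise
def innerA (prev curr res : Int) : List Int → Int
  | [] => res
  | x :: t => if x > prev then innerA x (curr + x) (max res (curr + x)) t else res

-- outer i-loop of A: start a fresh curr at every index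
def outerA (res : Int) : List Int → Int
  | [] => res
  | x :: t => outerA (innerA x x res t) t

def maxAscendingSum2 (nums : List Int) : Int :=
  match nums with
  | [] => 0  -- A raises IndexError here; excluded by Pre_
  | x :: t => outerA x (x :: t)

-- ===== PORT B =====
-- loop body of B: state = (nxt, p, res); x is the element just left of nxt
def stepB (st : Int × Int × Option Int) (x : Int) : Int × Int × Option Int :=
  match st with
  | (nxt, p, res) =>
    if nxt > x then
      let cand := x + p
      (x, x + max p 0, some (match res with | none => cand | some r => max r cand))
    else (x, x, res)

def maxAscendingSum2_alt (nums : List Int) : Int :=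
  match nums.reverse with
  | [] => 0  -- B raises StopIteration here; excluded by Pre_
  | nxt :: rest =>
    match (rest.foldl stepB (nxt, nxt, none)).2.2, nums with
    | none, x :: _ => x
    | some r, x :: _ => max x r
    | _, [] => 0  -- unreachable: nums.reverse nonempty forces nums nonempty

-- ===== PRECONDITION & SPEC =====
-- Pre_ excludes only the empty list, on which both Pythons raise (IndexError / StopIteration).
def Pre_maxAscendingSum2 (nums : List Int) : Prop := nums ≠ []
instance (nums : List Int) : Decidable (Pre_maxAscendingSum2 nums) := by unfold Pre_maxAscendingSum2; infer_instance
def pvWitness_maxAscendingSum2 : List Int := [3, 1, 2, 5, 4]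

def Spec_maxAscendingSum2 (nums : List Int) (out : Int) : Prop := out = maxAscendingSum2_alt nums
instance (nums : List Int) (out : Int) : Decidable (Spec_maxAscendingSum2 nums out) := by unfold Spec_maxAscendingSum2; infer_instance

-- ===== CLAIM (what is proved, stated in full; the proofs are below) =====
def Claim_equal_maxAscendingSum2 : Prop := ∀ (nums : List Int), Dom_maxAscendingSum2 nums → Pre_maxAscendingSum2 nums → Spec_maxAscendingSum2 nums (maxAscendingSum2 nums)

-- ===== LEMMAS AND PROOFS =====

-- best (relative) ascending continuation into t after an element prev; 0 if none taken
def Rrec (prev : Int) : List Int → Int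
  | [] => 0
  | x :: t => if x > prev then max 0 (x + Rrec x t) else 0

-- maximum sum of an ascending subarray of length ≥ 2 inside l (none if there is no such subarray)
def Mopt : List Int → Option Int
  | [] => none
  | [_] => none
  | x :: y :: t =>
    match (if y > x then some (x + y + Rrec y t) else none), Mopt (y :: t) with
    | none, m => m
    | some c, none => some c
    | some c, some m => some (max m c)

-- res after flushing the pending inner scan (curr ending at prev) into t
def Eflush (prev curr res : Int) (t : List Int) : Int :=
  match t with
  | [] => res
  | x :: t' => if x > prev then max res (curr + x + Rrec x t') else res

theorem innerA_eq (t : List Int) : ∀ prev curr res : Int,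
    innerA prev curr res t = Eflush prev curr res t := by
  induction t with
  | nil => intro prev curr res; rfl
  | cons x t' ih =>
    intro prev curr res
    simp only [innerA, Eflush]
    by_cases hx : x > prev
    · rw [if_pos hx, if_pos hx, ih]
      cases t' with
      | nil => simp [Eflush, Rrec]
      | cons y t'' =>
        by_cases hy : y > x
        · simp [Eflush, Rrec, hy]; omega
        · simp [Eflush, Rrec, hy]
    · rw [if_neg hx, if_neg hx]

-- A's outer loop computes max res (Mopt l) (when Mopt l exists)
theorem outerA_eq (l : List Int) : ∀ res : Int,
    outerA res l = match Mopt l with | none => res | some m => max res m := by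
  induction l with
  | nil => intro res; rfl
  | cons x t ih =>
    intro res
    simp only [outerA, innerA_eq t]
    rw [ih]
    cases t with
    | nil => rfl
    | cons y t' =>
      by_cases hy : y > x
      · simp only [Eflush, if_pos hy, Mopt]
        cases h : Mopt (y :: t') with
        | none => simp
        | some m =>
          simp only []
          rw [max_comm m (x + y + Rrec y t'), ← max_assoc]
      · simp only [Eflush, if_neg hy, Mopt]

-- the state B's fold reaches, defined by head recursion on the original list
def SB : Int → List Int → Int × Int × Option Int
  | x, [] => (x, x, none)
  | x, y :: t => stepB (SB y t) x

-- folding stepB over the reversed tail realises SB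
theorem fold_rev_eq (t : List Int) : ∀ x : Int,
    (match (x :: t).reverse with
     | [] => (0, 0, none)
     | nxt :: rest => rest.foldl stepB (nxt, nxt, none)) = SB x t := by
  induction t with
  | nil => intro x; rfl
  | cons y t' ih =>
    intro x
    have hrev : (x :: y :: t').reverse = (y :: t').reverse ++ [x] := by
      simp
    cases h : (y :: t').reverse with
    | nil => simp at h
    | cons nxt rest =>
      have := ih y
      rw [h] at this
      have this' : List.foldl stepB (nxt, nxt, none) rest = SB y t' := this
      simp only [hrev, h]
      simp only [List.cons_append, List.foldl_append, List.foldl_cons, List.foldl_nil]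
      rw [this']
      rfl

-- SB's components: the running best continuation and the collected maximum
theorem SB_eq (t : List Int) : ∀ x : Int,
    SB x t = (x, x + Rrec x t, Mopt (x :: t)) := by
  induction t with
  | nil => intro x; simp [SB, Rrec, Mopt]
  | cons y t' ih =>
    intro x
    simp only [SB, ih y, stepB]
    by_cases hy : y > x
    · rw [if_pos hy]
      cases h : Mopt (y :: t') with
      | none => simp [Mopt, Rrec, hy, h]; omega
      | some m => simp [Mopt, Rrec, hy, h]; omega
    · rw [if_neg hy]
      simp [Mopt, Rrec, hy]

-- ===== VERDICT (by name: the statement is the Claim_ definition above) =====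
theorem maxAscendingSum2_spec : Claim_equal_maxAscendingSum2 := by
  intro nums _hdom hpre
  unfold Spec_maxAscendingSum2
  cases nums with
  | nil => exact absurd rfl hpre
  | cons x t =>
    have hB := fold_rev_eq t x
    simp only [maxAscendingSum2, maxAscendingSum2_alt, outerA_eq]
    cases h : (x :: t).reverse with
    | nil => simp at h
    | cons nxt rest =>
      rw [h] at hB
      have hB' : List.foldl stepB (nxt, nxt, none) rest = SB x t := hB
      show (match Mopt (x :: t) with | none => x | some m => max x m)
         = (match (List.foldl stepB (nxt, nxt, none) rest).2.2, x :: t with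
            | none, x :: _ => x
            | some r, x :: _ => max x r
            | _, [] => 0)
      rw [hB', SB_eq]
      cases hm : Mopt (x :: t) <;> simp
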